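-- pv_equiv track=rewrite | github.com/carloterzaghi/Discord_Bot_Kurami | artefatos_genshin/atq_artefato.py | atq_artefato
-- ===== SOURCE A (Python) =====
-- def atq_artefato(nome):
--     if nome == "Vazio":
--         return ""
--     atq = ''
--     pegar = 'nao'
--     for i in nome:
--         if i == "K":
--             pegar = 'sim'
--         elif i.isnumeric() == False:
--             pegar = 'nao'
--         elif pegar == 'sim':
--             atq = atq + i
--     if atq == '':
--         atq = '0'
--     return atq
-- ===== SOURCE B (Python) =====
-- def atq_artefato(nome):
--     if nome == "Vazio":
--         return ""
--     parts = []
--     for k in range(len(nome)):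
--         if nome[k] == "K":
--             run = []
--             j = k + 1
--             while j < len(nome) and nome[j].isnumeric():
--                 run.append(nome[j])
--                 j += 1
--             parts.append("".join(run))
--     atq = "".join(parts)
--     return atq if atq else "0"
-- ===== Notes on version B (the rewrite author's own statement) =====
-- stated objective: alternative
-- what changed: Replaces A's single-pass flag state machine by an outer loop over the positions of the marker letter with an inner forward scan collecting the digit run after each occurrence, concatenated in order.
import Mathlib
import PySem

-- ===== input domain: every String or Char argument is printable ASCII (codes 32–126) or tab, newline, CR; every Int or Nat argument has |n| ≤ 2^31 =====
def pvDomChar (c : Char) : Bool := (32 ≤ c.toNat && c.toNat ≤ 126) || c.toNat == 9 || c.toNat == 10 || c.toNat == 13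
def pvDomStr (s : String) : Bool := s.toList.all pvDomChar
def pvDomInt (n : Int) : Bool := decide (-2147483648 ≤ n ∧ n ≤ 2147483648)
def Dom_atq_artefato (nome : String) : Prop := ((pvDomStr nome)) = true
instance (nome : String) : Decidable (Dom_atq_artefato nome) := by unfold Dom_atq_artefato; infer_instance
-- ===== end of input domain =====

-- B replaces A's flag state machine by an outer scan over marker-letter positions with an
-- inner digit-run scan (alternative decomposition, same cost).
-- Python's .isnumeric() is ported as PySem.Chars.isdigit — exact on the ASCII domain Dom.

-- ===== PORT A =====
-- state: (atq as List Char, pegar as the Python string "sim"/"nao")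
def atqStep (st : List Char × String) (i : Char) : List Char × String :=
  if i = 'K' then (st.1, "sim")
  else if PySem.Chars.isdigit i = false then (st.1, "nao")
  else if st.2 = "sim" then (st.1 ++ [i], st.2)
  else st

def atq_artefato (nome : String) : String :=
  if nome = "Vazio" then ""
  else
    let res := nome.toList.foldl atqStep ([], "nao")
    let atq := res.1
    if atq = [] then "0" else String.ofList atq

-- ===== PORT B =====
-- per position: if the char is 'K', collect the digit run of the following chars
def collectRuns : List Char → List Char
  | [] => []
  | c :: rest => (if c = 'K' then rest.takeWhile PySem.Chars.isdigit else []) ++ collectRuns rest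

def atq_artefato_alt (nome : String) : String :=
  if nome = "Vazio" then ""
  else
    let atq := collectRuns nome.toList
    if atq = [] then "0" else String.ofList atq

-- ===== PRECONDITION & SPEC =====
def Spec_atq_artefato (nome : String) (out : String) : Prop := out = atq_artefato_alt nome
instance (nome : String) (out : String) : Decidable (Spec_atq_artefato nome out) := by unfold Spec_atq_artefato; infer_instance

-- ===== CLAIM (what is proved, stated in full; the proofs are below) =====
def Claim_equal_atq_artefato : Prop := ∀ (nome : String), Dom_atq_artefato nome → Spec_atq_artefato nome (atq_artefato nome)

-- ===== LEMMAS AND PROOFS =====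

lemma atq_loop_eq (l : List Char) :
    (∀ atq, (l.foldl atqStep (atq, "sim")).1
        = atq ++ l.takeWhile PySem.Chars.isdigit ++ collectRuns l) ∧
    (∀ atq (p : String), p ≠ "sim" → (l.foldl atqStep (atq, p)).1 = atq ++ collectRuns l) := by
  induction l with
  | nil => simp [collectRuns]
  | cons c rest ih =>
    constructor
    · intro atq
      by_cases hK : c = 'K'
      · subst hK
        have hd : PySem.Chars.isdigit 'K' = false := by decide
        simp [List.foldl_cons, atqStep, hd, collectRuns, ih.1 atq]
      · by_cases hd : PySem.Chars.isdigit c = true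
        · simp [List.foldl_cons, atqStep, hK, hd, collectRuns, List.takeWhile_cons, ih.1 (atq ++ [c])]
        · simp only [Bool.not_eq_true] at hd
          simp [List.foldl_cons, atqStep, hK, hd, collectRuns,
            ih.2 atq "nao" (by decide)]
    · intro atq p hp
      by_cases hK : c = 'K'
      · subst hK
        simp [List.foldl_cons, atqStep, collectRuns, ih.1 atq]
      · by_cases hd : PySem.Chars.isdigit c = true
        · simp [List.foldl_cons, atqStep, hK, hd, hp, collectRuns, ih.2 atq p hp]
        · simp only [Bool.not_eq_true] at hd
          simp [List.foldl_cons, atqStep, hK, hd, collectRuns, ih.2 atq "nao" (by decide)]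

-- ===== VERDICT (by name: the statement is the Claim_ definition above) =====
theorem atq_artefato_spec : Claim_equal_atq_artefato := by
  intro nome _
  unfold Spec_atq_artefato atq_artefato atq_artefato_alt
  by_cases h : nome = "Vazio"
  · simp [h]
  · simp [h, (atq_loop_eq nome.toList).2 [] "nao" (by decide)]
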